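-- pv_equiv track=rewrite | github.com/tilaboy/work_note | algorithms/notes/ch21/off_line_extract_min.py | _prepare_k_arr
-- ===== SOURCE A (Python) =====
-- def _prepare_k_arr(input):
--     i = 0
--     k_arr = dict()
--     curr_arr = list()
--     for ele in input:
--         if ele == 'E':
--             k_arr[i] = list(curr_arr)
--             curr_arr = list()
--             i += 1
--         else:
--             curr_arr.append(ele)
--     return k_arr
-- ===== SOURCE B (Python) =====
-- def _prepare_k_arr(input):
--     arr = list(input)
--     positions = [pos for pos, ele in enumerate(arr) if ele == 'E']
--     k_arr = dict()
--     start = 0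
--     for i, pos in enumerate(positions):
--         k_arr[i] = arr[start:pos]
--         start = pos + 1
--     return k_arr
-- ===== Notes on version B (the rewrite author's own statement) =====
-- stated objective: alternative
-- what changed: B first builds the list of indices of 'E' markers in one pass and then slices arr between consecutive markers, instead of A's single incremental-accumulator loop; trailing elements after the last 'E' are dropped by construction.
import Mathlib
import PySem

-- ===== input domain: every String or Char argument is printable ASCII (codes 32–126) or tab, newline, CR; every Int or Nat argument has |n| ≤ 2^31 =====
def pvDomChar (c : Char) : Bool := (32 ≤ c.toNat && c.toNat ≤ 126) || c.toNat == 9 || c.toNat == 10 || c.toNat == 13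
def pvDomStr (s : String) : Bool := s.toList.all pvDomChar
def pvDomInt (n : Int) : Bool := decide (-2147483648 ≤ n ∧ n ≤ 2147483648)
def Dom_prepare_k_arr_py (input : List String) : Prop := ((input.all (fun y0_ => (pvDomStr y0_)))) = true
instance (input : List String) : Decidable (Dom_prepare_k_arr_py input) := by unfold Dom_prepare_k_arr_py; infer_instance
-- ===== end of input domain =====

-- B groups the elements between 'E' markers by first indexing the marker positions and then
-- slicing between consecutive markers, instead of A's incremental accumulator loop (alternative decomposition, same cost).

-- ===== PORT A =====
-- state = (i, curr_arr, k_arr); dict[i] = … ported as PySem.Dict.insert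
def prepare_k_arr_py (input : List String) : List (Int × List String) :=
  let st := input.foldl
    (fun (st : Int × List String × PySem.Dict Int (List String)) ele =>
      if ele == "E" then (st.1 + 1, [], st.2.2.insert st.1 st.2.1)
      else (st.1, st.2.1 ++ [ele], st.2.2))
    (0, [], PySem.Dict.empty)
  st.2.2.items

-- ===== PORT B =====
-- [pos for pos, ele in enumerate(arr) if ele == 'E']
def pvPositions (arr : List String) : List Int :=
  ((PySem.List.enumerate arr).filter (fun p => p.2 == "E")).map (·.1)

-- for i, pos in enumerate(positions): k_arr[i] = arr[start:pos]; start = pos + 1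
def prepare_k_arr_py_alt (input : List String) : List (Int × List String) :=
  let arr := input
  let st := (pvPositions arr).foldl
    (fun (st : Int × Int × PySem.Dict Int (List String)) pos =>
      (st.1 + 1, pos + 1, st.2.2.insert st.1 (PySem.List.slice arr (some st.2.1) (some pos))))
    (0, 0, PySem.Dict.empty)
  st.2.2.items

-- ===== PRECONDITION & SPEC =====
def Spec_prepare_k_arr_py (input : List String) (out : List (Int × List String)) : Prop := out = prepare_k_arr_py_alt input
instance (input : List String) (out : List (Int × List String)) : Decidable (Spec_prepare_k_arr_py input out) := by unfold Spec_prepare_k_arr_py; infer_instance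

-- ===== CLAIM (what is proved, stated in full; the proofs are below) =====
def Claim_equal_prepare_k_arr_py : Prop := ∀ (input : List String), Dom_prepare_k_arr_py input → Spec_prepare_k_arr_py input (prepare_k_arr_py input)

-- ===== LEMMAS AND PROOFS =====

-- the list of groups between 'E' markers (proof-side characterisation)
def pvConsHead (e : String) : List (List String) → List (List String)
  | [] => []
  | h :: t => (e :: h) :: t

def pvGroups : List String → List (List String)
  | [] => []
  | e :: rest => if e = "E" then [] :: pvGroups rest else pvConsHead e (pvGroups rest)

def pvPrependFirst (c : List String) : List (List String) → List (List String)
  | [] => []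
  | h :: t => (c ++ h) :: t

def pvNumbered (i : Int) : List (List String) → List (Int × List String)
  | [] => []
  | h :: t => (i, h) :: pvNumbered (i + 1) t

theorem pvPrependFirst_nil (t : List (List String)) : pvPrependFirst [] t = t := by
  cases t <;> simp [pvPrependFirst]

theorem pvPrependFirst_cons (c : List String) (h : List String) (t : List (List String)) :
    pvPrependFirst c (h :: t) = (c ++ h) :: t := rfl

theorem pvPrependFirst_consHead (c : List String) (e : String) (t : List (List String)) :
    pvPrependFirst (c ++ [e]) t = pvPrependFirst c (pvConsHead e t) := by
  cases t <;> simp [pvPrependFirst, pvConsHead]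

-- A's fold, characterised
theorem pvA_char (arr : List String) (i : Int) (curr : List String)
    (d : PySem.Dict Int (List String)) (hd : ∀ k ∈ d.keys, k < i) :
    (arr.foldl
      (fun (st : Int × List String × PySem.Dict Int (List String)) ele =>
        if ele == "E" then (st.1 + 1, [], st.2.2.insert st.1 st.2.1)
        else (st.1, st.2.1 ++ [ele], st.2.2))
      (i, curr, d)).2.2.items
      = d.items ++ pvNumbered i (pvPrependFirst curr (pvGroups arr)) := by
  induction arr generalizing i curr d with
  | nil => simp [pvGroups, pvPrependFirst, pvNumbered]
  | cons e rest ih =>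
      by_cases he : e = "E"
      · subst he
        have hni : d.contains i = false := by
          by_contra h
          have : i ∈ d.keys := (PySem.Dict.contains_iff_mem_keys d i).1 (by simpa using h)
          exact absurd (hd i this) (by omega)
        have hd' : ∀ k ∈ (d.insert i curr).keys, k < i + 1 := by
          intro k hk
          rcases (PySem.Dict.mem_keys_insert d i k curr).1 hk with h | h
          · omega
          · have := hd k h; omega
        rw [List.foldl_cons, if_pos (by simp), ih (i + 1) [] (d.insert i curr) hd',
            PySem.Dict.items_insert_of_not_contains _ _ hni]
        simp [pvGroups, pvNumbered, pvPrependFirst_nil, pvPrependFirst_cons]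
      · rw [List.foldl_cons, if_neg (by simpa using he), ih i (curr ++ [e]) d hd]
        simp [pvGroups, he, pvPrependFirst_consHead]

-- positions, offset-parameterised
theorem pvPositions_from_cons (e : String) (rest : List String) (s : Int) :
    ((PySem.List.enumerate (e :: rest) s).filter (fun p => p.2 == "E")).map (·.1)
      = (if e = "E" then [s] else []) ++ ((PySem.List.enumerate rest (s + 1)).filter (fun p => p.2 == "E")).map (·.1) := by
  rw [PySem.List.enumerate_cons]
  by_cases he : e = "E" <;> simp [he]

theorem pvTakeDrop (pre x : List String) (b : Nat) (hb : b ≤ pre.length) :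
    ((pre ++ x).drop b).take (pre.length - b) = pre.drop b := by
  rw [List.drop_append_of_le_length hb, List.take_append_of_le_length (by simp),
      List.take_of_length_le (by simp)]

-- B's fold, characterised
theorem pvB_char (arr : List String) (pre : List String) (b : Nat) (hb : b ≤ pre.length)
    (i : Int) (d : PySem.Dict Int (List String)) (hd : ∀ k ∈ d.keys, k < i) :
    ((((PySem.List.enumerate arr ((pre.length : Nat) : Int)).filter (fun p => p.2 == "E")).map (·.1)).foldl
      (fun (st : Int × Int × PySem.Dict Int (List String)) pos =>
        (st.1 + 1, pos + 1, st.2.2.insert st.1 (PySem.List.slice (pre ++ arr) (some st.2.1) (some pos))))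
      (i, ((b : Nat) : Int), d)).2.2.items
      = d.items ++ pvNumbered i (pvPrependFirst (pre.drop b) (pvGroups arr)) := by
  induction arr generalizing pre b i d with
  | nil => simp [PySem.List.enumerate, pvGroups, pvPrependFirst, pvNumbered]
  | cons e rest ih =>
      rw [pvPositions_from_cons]
      have hcast : ((pre.length : Nat) : Int) + 1 = (((pre.length + 1 : Nat)) : Int) := by push_cast; ring
      by_cases he : e = "E"
      · subst he
        have hni : d.contains i = false := by
          by_contra h
          have : i ∈ d.keys := (PySem.Dict.contains_iff_mem_keys d i).1 (by simpa using h)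
          exact absurd (hd i this) (by omega)
        have hd' : ∀ k ∈ (d.insert i (pre.drop b)).keys, k < i + 1 := by
          intro k hk
          rcases (PySem.Dict.mem_keys_insert d i k (pre.drop b)).1 hk with h | h
          · omega
          · have := hd k h; omega
        have hslice : PySem.List.slice (pre ++ "E" :: rest) (some ((b : Nat) : Int)) (some ((pre.length : Nat) : Int))
            = pre.drop b := by
          rw [PySem.List.slice_natCast, pvTakeDrop pre _ b hb]
        have heq : (pre ++ ["E"]).length = pre.length + 1 := by simp
        have hih := ih (pre ++ ["E"]) (pre.length + 1) (by simp) (i + 1)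
          (d.insert i (pre.drop b)) hd'
        rw [heq] at hih
        rw [if_pos rfl, List.singleton_append, List.foldl_cons]
        dsimp only
        rw [hslice, List.append_cons pre "E" rest, hcast, hih,
            PySem.Dict.items_insert_of_not_contains _ _ hni]
        simp [pvGroups, pvNumbered, pvPrependFirst_nil, pvPrependFirst_cons]
      · have heq : (pre ++ [e]).length = pre.length + 1 := by simp
        have hb' : b ≤ (pre ++ [e]).length := by simp; omega
        have hih := ih (pre ++ [e]) b hb' i d hd
        rw [heq] at hih
        rw [if_neg he, List.nil_append, List.append_cons pre e rest, hcast, hih]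
        simp [pvGroups, he, ← pvPrependFirst_consHead, List.drop_append_of_le_length hb]

-- ===== VERDICT (by name: the statement is the Claim_ definition above) =====
theorem prepare_k_arr_py_spec : Claim_equal_prepare_k_arr_py := by
  unfold Claim_equal_prepare_k_arr_py
  intro input _
  unfold Spec_prepare_k_arr_py prepare_k_arr_py prepare_k_arr_py_alt pvPositions
  have hA := pvA_char input 0 [] PySem.Dict.empty (by simp [PySem.Dict.keys_empty])
  have hB := pvB_char input [] 0 (by simp) 0 PySem.Dict.empty (by simp [PySem.Dict.keys_empty])
  simp only [List.length_nil, Nat.cast_zero, List.nil_append] at hB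
  simp only [hA, hB, pvPrependFirst_nil, List.drop_zero]
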